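-- pv_equiv track=rewrite | github.com/ashdyl17/aimedchat | aimedchat.py | is_medical_question
-- ===== SOURCE A (Python) =====
-- def is_medical_question(question):
--     """Check if the question is medical-related"""
--     medical_keywords = [
--         'pain', 'hurt', 'ache', 'fever', 'cough', 'cold', 'flu', 'headache', 'stomach',
--         'nausea', 'vomit', 'diarrhea', 'constipation', 'rash', 'itch', 'swelling',
--         'bruise', 'cut', 'burn', 'bleeding', 'dizzy', 'tired', 'fatigue', 'weak',
--         'sick', 'ill', 'disease', 'infection', 'virus', 'bacteria', 'medicine',
--         'medication', 'pill', 'tablet', 'symptom', 'diagnosis', 'treatment',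
--         'doctor', 'hospital', 'clinic', 'emergency', 'ambulance', 'surgery',
--         'operation', 'therapy', 'recovery', 'healing', 'wound', 'injury',
--         'bone', 'muscle', 'joint', 'back', 'neck', 'shoulder', 'knee', 'ankle',
--         'heart', 'lung', 'liver', 'kidney', 'brain', 'blood', 'pressure',
--         'diabetes', 'cancer', 'asthma', 'allergy', 'asthma', 'arthritis',
--         'sleep', 'insomnia', 'stress', 'anxiety', 'depression', 'mental',
--         'diet', 'nutrition', 'vitamin', 'supplement', 'exercise', 'fitness',
--         'weight', 'obesity', 'cholesterol', 'blood sugar', 'hypertension'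
--     ]
--
--     question_lower = question.lower()
--     return any(keyword in question_lower for keyword in medical_keywords)
-- ===== SOURCE B (Python) =====
-- KEYWORD_SRC = ('pain|hurt|ache|fever|cough|cold|flu|headache|stomach|'
--                'nausea|vomit|diarrhea|constipation|rash|itch|swelling|'
--                'bruise|cut|burn|bleeding|dizzy|tired|fatigue|weak|'
--                'sick|ill|disease|infection|virus|bacteria|medicine|'
--                'medication|pill|tablet|symptom|diagnosis|treatment|'
--                'doctor|hospital|clinic|emergency|ambulance|surgery|'
--                'operation|therapy|recovery|healing|wound|injury|'
--                'bone|muscle|joint|back|neck|shoulder|knee|ankle|'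
--                'heart|lung|liver|kidney|brain|blood|pressure|'
--                'diabetes|cancer|asthma|allergy|asthma|arthritis|'
--                'sleep|insomnia|stress|anxiety|depression|mental|'
--                'diet|nutrition|vitamin|supplement|exercise|fitness|'
--                'weight|obesity|cholesterol|blood sugar|hypertension')
--
-- def is_medical_question(question):
--     """Check if the question is medical-related"""
--     # Keywords kept as one delimited string; index them once by first character,
--     # then make ONE pass over the text: at each position only the keywords
--     # starting with that character are tried.
--     index = {}
--     for kw in KEYWORD_SRC.split('|'):
--         index.setdefault(kw[0], []).append(kw)
--     q = question.lower()
--     for i, ch in enumerate(q):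
--         if any(q.startswith(kw, i) for kw in index.get(ch, [])):
--             return True
--     return False
-- ===== Notes on version B (the rewrite author's own statement) =====
-- stated objective: alternative
-- what changed: Replaces the per-keyword substring searches (any over 'kw in text') with a first-character hash index built once from a delimited keyword string and a single left-to-right scan of the text that tries only the keywords bucketed under the current character.
import Mathlib
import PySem

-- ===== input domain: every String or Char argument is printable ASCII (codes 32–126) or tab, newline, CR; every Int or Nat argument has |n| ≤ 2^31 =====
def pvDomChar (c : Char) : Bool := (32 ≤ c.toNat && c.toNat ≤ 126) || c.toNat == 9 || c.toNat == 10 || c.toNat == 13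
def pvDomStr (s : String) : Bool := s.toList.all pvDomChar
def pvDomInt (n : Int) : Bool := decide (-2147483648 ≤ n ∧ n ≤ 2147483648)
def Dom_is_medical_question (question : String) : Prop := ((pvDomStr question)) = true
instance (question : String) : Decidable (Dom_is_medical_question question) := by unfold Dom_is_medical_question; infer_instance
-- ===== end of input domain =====

-- B replaces A's per-keyword substring searches with a first-character index (built from one delimited keyword string) and one scan of the text (alternative decomposition, same results).


-- ===== PORT A =====
-- the literal keyword list A carries
def medicalKeywords : List String := [
  "pain", "hurt", "ache", "fever", "cough", "cold", "flu", "headache", "stomach",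
  "nausea", "vomit", "diarrhea", "constipation", "rash", "itch", "swelling",
  "bruise", "cut", "burn", "bleeding", "dizzy", "tired", "fatigue", "weak",
  "sick", "ill", "disease", "infection", "virus", "bacteria", "medicine",
  "medication", "pill", "tablet", "symptom", "diagnosis", "treatment",
  "doctor", "hospital", "clinic", "emergency", "ambulance", "surgery",
  "operation", "therapy", "recovery", "healing", "wound", "injury",
  "bone", "muscle", "joint", "back", "neck", "shoulder", "knee", "ankle",
  "heart", "lung", "liver", "kidney", "brain", "blood", "pressure",
  "diabetes", "cancer", "asthma", "allergy", "asthma", "arthritis",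
  "sleep", "insomnia", "stress", "anxiety", "depression", "mental",
  "diet", "nutrition", "vitamin", "supplement", "exercise", "fitness",
  "weight", "obesity", "cholesterol", "blood sugar", "hypertension"]

-- any(keyword in question_lower for keyword in medical_keywords)
def is_medical_question (question : String) : Bool :=
  medicalKeywords.any (fun keyword => PySem.Str.isIn keyword (PySem.Str.lower question))

-- ===== PORT B =====
-- B's KEYWORD_SRC: the keywords kept as one '|'-delimited string
def kwSrc : String := "pain|hurt|ache|fever|cough|cold|flu|headache|stomach|nausea|vomit|diarrhea|constipation|rash|itch|swelling|bruise|cut|burn|bleeding|dizzy|tired|fatigue|weak|sick|ill|disease|infection|virus|bacteria|medicine|medication|pill|tablet|symptom|diagnosis|treatment|doctor|hospital|clinic|emergency|ambulance|surgery|operation|therapy|recovery|healing|wound|injury|bone|muscle|joint|back|neck|shoulder|knee|ankle|heart|lung|liver|kidney|brain|blood|pressure|diabetes|cancer|asthma|allergy|asthma|arthritis|sleep|insomnia|stress|anxiety|depression|mental|diet|nutrition|vitamin|supplement|exercise|fitness|weight|obesity|cholesterol|blood sugar|hypertension"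

-- kw[0] of a nonempty keyword (the .getD ' ' only makes the lookup total; every keyword is nonempty)
def kwHead (kw : String) : Char := (PySem.List.pyGet? kw.toList 0).getD ' '

-- KEYWORD_SRC.split('|') is a plain list here (sep nonempty, so split? = some); .getD [] only totalizes
-- for kw in KEYWORD_SRC.split('|'): index.setdefault(kw[0], []).append(kw)
def kwIndex : PySem.Dict Char (List String) :=
  ((PySem.Str.split? kwSrc "|").getD []).foldl (fun d kw => d.modify (kwHead kw) [] (· ++ [kw])) PySem.Dict.empty

-- for i, ch in enumerate(q): any(q.startswith(kw, i) …) — one pass over the text,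
-- rendered as structural recursion on the suffix q[i:], at which startswith(kw, i) is exact
def scanText (idx : PySem.Dict Char (List String)) : List Char → Bool
  | [] => false
  | c :: rest =>
      if (idx.getD c []).any (fun kw => PySem.Chars.startswith (c :: rest) kw.toList) then true
      else scanText idx rest

def is_medical_question_alt (question : String) : Bool :=
  scanText kwIndex (PySem.Str.lower question).toList

-- ===== PRECONDITION & SPEC =====
def Spec_is_medical_question (question : String) (out : Bool) : Prop := out = is_medical_question_alt question
instance (question : String) (out : Bool) : Decidable (Spec_is_medical_question question out) := by unfold Spec_is_medical_question; infer_instance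

-- ===== CLAIM (what is proved, stated in full; the proofs are below) =====
def Claim_equal_is_medical_question : Prop := ∀ (question : String), Dom_is_medical_question question → Spec_is_medical_question question (is_medical_question question)

-- ===== LEMMAS AND PROOFS =====

-- B's delimited string splits back to exactly A's keyword list
set_option maxRecDepth 8000 in
set_option maxHeartbeats 2000000 in
theorem kwSrc_split : (PySem.Str.split? kwSrc "|").getD [] = medicalKeywords := by decide

-- every keyword is nonempty
theorem medicalKeywords_ne_nil : ∀ kw ∈ medicalKeywords, kw.toList ≠ [] := by decide

-- the bucket under c is exactly the keywords whose first character is c, in order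
theorem kwIndex_getD (c : Char) :
    kwIndex.getD c [] = medicalKeywords.filter (fun kw => kwHead kw == c) := by
  have h : kwIndex = (medicalKeywords.map (fun kw => (kwHead kw, kw))).foldl
      (fun d p => d.modify p.1 [] (· ++ [p.2])) PySem.Dict.empty := by
    rw [List.foldl_map]; unfold kwIndex; rw [kwSrc_split]
  rw [h, PySem.Dict.getD_foldl_modify_append]
  simp [List.filter_map, Function.comp_def]

theorem mem_kwIndex (c : Char) (kw : String) :
    kw ∈ kwIndex.getD c [] ↔ kw ∈ medicalKeywords ∧ kwHead kw = c := by
  rw [kwIndex_getD]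
  simp [List.mem_filter]

theorem scanText_iff (s : List Char) :
    scanText kwIndex s = true ↔
      ∃ kw ∈ medicalKeywords, ∃ j : Nat, kw.toList <+: s.drop j := by
  induction s with
  | nil =>
    simp only [scanText]
    constructor
    · intro h; cases h
    · rintro ⟨kw, hkw, j, hpre⟩
      exact absurd (List.prefix_nil.mp (by simpa using hpre)) (medicalKeywords_ne_nil kw hkw)
  | cons c rest ih =>
    simp only [scanText]
    by_cases hb : (kwIndex.getD c []).any (fun kw => PySem.Chars.startswith (c :: rest) kw.toList) = true
    · simp only [hb, if_true, true_iff]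
      rcases List.any_eq_true.mp hb with ⟨kw, hmem, hsw⟩
      rcases (mem_kwIndex c kw).mp hmem with ⟨hK, _⟩
      exact ⟨kw, hK, 0, by simpa using (PySem.Chars.startswith_iff _ _).mp hsw⟩
    · rw [if_neg hb, ih]
      constructor
      · rintro ⟨kw, hK, j, hpre⟩
        exact ⟨kw, hK, j + 1, by simpa using hpre⟩
      · rintro ⟨kw, hK, j, hpre⟩
        cases j with
        | zero =>
          exfalso
          apply hb
          apply List.any_eq_true.mpr
          have hpre' : kw.toList <+: c :: rest := by simpa using hpre
          refine ⟨kw, ?_, (PySem.Chars.startswith_iff _ _).mpr hpre'⟩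
          apply (mem_kwIndex c kw).mpr
          refine ⟨hK, ?_⟩
          cases hkl : kw.toList with
          | nil => exact absurd hkl (medicalKeywords_ne_nil kw hK)
          | cons a as =>
            obtain ⟨t, ht⟩ := hpre'
            rw [hkl] at ht
            injection ht with h1 _
            subst h1
            simp only [kwHead, hkl]
            simp [PySem.List.pyGet?_of_nonneg_of_lt]
        | succ j' =>
          exact ⟨kw, hK, j', by simpa using hpre⟩

-- ===== VERDICT (by name: the statement is the Claim_ definition above) =====
theorem is_medical_question_spec : Claim_equal_is_medical_question := by
  intro question _
  unfold Spec_is_medical_question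
  rw [Bool.eq_iff_iff]
  unfold is_medical_question is_medical_question_alt
  rw [List.any_eq_true, scanText_iff]
  constructor
  · rintro ⟨kw, hK, hin⟩
    rcases (PySem.Chars.exists_prefix_drop_iff_isIn kw.toList (PySem.Str.lower question).toList).mpr
      (by simpa using hin) with ⟨j, hpre⟩
    exact ⟨kw, hK, j, hpre⟩
  · rintro ⟨kw, hK, j, hpre⟩
    refine ⟨kw, hK, ?_⟩
    have := (PySem.Chars.exists_prefix_drop_iff_isIn kw.toList (PySem.Str.lower question).toList).mp ⟨j, hpre⟩
    simpa using this
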